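-- pv_equiv track=rewrite | github.com/vishakjai/synthetix | utils/architect_handoff.py | _route_target_service_from_text
-- ===== SOURCE A (Python) =====
-- def _route_target_service_from_text(text: str) -> str:
--     lowered = str(text or "").lower()
--     if not lowered:
--         return ""
--     auth_tokens = ("login", "password", "credential", "lockout", "failed attempt", "authenticate", "signin", "recordcount < 1")
--     legacy_core_tokens = ("frminterest", "addinterest", "withindate", "frmdaily", "daily report", "legacy core")
--     transaction_tokens = ("deposit", "withdraw", "transaction", "ledger", "balance", "interest", "funds", "atomic", "rollback", "expire")
--     customer_tokens = (
--         "customer",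
--         "account holder",
--         "profile",
--         "firstname",
--         "lastname",
--         "address",
--         "phone",
--         "email",
--         "unique account",
--         "tblcustomer",
--         "tblcustomers",
--         "tblaccount",
--         "customerid",
--         "accountno",
--     )
--     reporting_tokens = ("statement", "report", "print", "export", "monthly summary", "ledger extract")
--     reference_tokens = ("account type", "settings", "reference", "lookup", "configuration")
--     if any(token in lowered for token in auth_tokens):
--         return "AuthenticationService"
--     if any(token in lowered for token in legacy_core_tokens):
--         return "LegacyCoreService"
--     if any(token in lowered for token in reporting_tokens):
--         return "ReportingService"
--     if any(token in lowered for token in reference_tokens):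
--         return "ReferenceDataService"
--     if any(token in lowered for token in customer_tokens) and not any(token in lowered for token in transaction_tokens):
--         return "CustomerService"
--     if any(token in lowered for token in transaction_tokens):
--         return "TransactionService"
--     if any(token in lowered for token in customer_tokens):
--         return "CustomerService"
--     return ""
-- ===== SOURCE B (Python) =====
-- # B: flat token->priority-rank map; gather every matched rank in one pass and
-- # return the service of the minimum rank (min-priority selection instead of a
-- # branch chain; A's (customer and not transaction) logic collapses to rank order).
-- _GROUPS = (
--     ("login", "password", "credential", "lockout", "failed attempt", "authenticate", "signin", "recordcount < 1"),
--     ("frminterest", "addinterest", "withindate", "frmdaily", "daily report", "legacy core"),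
--     ("statement", "report", "print", "export", "monthly summary", "ledger extract"),
--     ("account type", "settings", "reference", "lookup", "configuration"),
--     ("deposit", "withdraw", "transaction", "ledger", "balance", "interest", "funds", "atomic", "rollback", "expire"),
--     ("customer", "account holder", "profile", "firstname", "lastname", "address", "phone", "email", "unique account", "tblcustomer", "tblcustomers", "tblaccount", "customerid", "accountno"),
-- )
-- _SERVICES = ["AuthenticationService", "LegacyCoreService", "ReportingService", "ReferenceDataService", "TransactionService", "CustomerService"]
-- _TOKEN_RANK = {token: rank for rank, group in enumerate(_GROUPS) for token in group}
--
--
-- def _route_target_service_from_text(text: str) -> str: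
--     lowered = str(text or "").lower()
--     matched = [rank for token, rank in _TOKEN_RANK.items() if token in lowered]
--     return _SERVICES[min(matched)] if matched else ""
-- ===== Notes on version B (the rewrite author's own statement) =====
-- stated objective: alternative
-- what changed: Replaced the unrolled priority branch chain (with its redundant 'customer and not transaction' test and duplicated customer check) by min-priority selection: a flat token-to-rank dictionary is scanned once, all matched ranks are collected, and the service of the minimum rank is returned.
import Mathlib
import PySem

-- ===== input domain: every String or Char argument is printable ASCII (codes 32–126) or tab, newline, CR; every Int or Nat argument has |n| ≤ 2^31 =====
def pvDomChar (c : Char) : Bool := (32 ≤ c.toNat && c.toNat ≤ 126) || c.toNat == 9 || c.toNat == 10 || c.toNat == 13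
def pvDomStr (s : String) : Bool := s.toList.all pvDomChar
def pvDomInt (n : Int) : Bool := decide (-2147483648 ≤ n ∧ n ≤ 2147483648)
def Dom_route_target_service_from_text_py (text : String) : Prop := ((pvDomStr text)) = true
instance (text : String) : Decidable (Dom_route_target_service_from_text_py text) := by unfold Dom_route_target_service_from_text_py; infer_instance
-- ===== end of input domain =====

-- ===== PORT A =====
-- B replaces A's priority branch chain by min-priority selection over a flat token->rank map; objective: alternative decomposition.
def route_target_service_from_text_py (text : String) : String :=
  let lowered := PySem.Str.lower (if text = "" then "" else text)
  if lowered = "" then ""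
  else
    let auth_tokens := ["login", "password", "credential", "lockout", "failed attempt", "authenticate", "signin", "recordcount < 1"]
    let legacy_core_tokens := ["frminterest", "addinterest", "withindate", "frmdaily", "daily report", "legacy core"]
    let transaction_tokens := ["deposit", "withdraw", "transaction", "ledger", "balance", "interest", "funds", "atomic", "rollback", "expire"]
    let customer_tokens := ["customer", "account holder", "profile", "firstname", "lastname", "address", "phone", "email", "unique account", "tblcustomer", "tblcustomers", "tblaccount", "customerid", "accountno"]
    let reporting_tokens := ["statement", "report", "print", "export", "monthly summary", "ledger extract"]
    let reference_tokens := ["account type", "settings", "reference", "lookup", "configuration"]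
    if auth_tokens.any (fun token => PySem.Str.isIn token lowered) then "AuthenticationService"
    else if legacy_core_tokens.any (fun token => PySem.Str.isIn token lowered) then "LegacyCoreService"
    else if reporting_tokens.any (fun token => PySem.Str.isIn token lowered) then "ReportingService"
    else if reference_tokens.any (fun token => PySem.Str.isIn token lowered) then "ReferenceDataService"
    else if customer_tokens.any (fun token => PySem.Str.isIn token lowered) && !(transaction_tokens.any (fun token => PySem.Str.isIn token lowered)) then "CustomerService"
    else if transaction_tokens.any (fun token => PySem.Str.isIn token lowered) then "TransactionService"
    else if customer_tokens.any (fun token => PySem.Str.isIn token lowered) then "CustomerService"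
    else ""

-- ===== PORT B =====
def pvGroups : List (List String) :=
  [["login", "password", "credential", "lockout", "failed attempt", "authenticate", "signin", "recordcount < 1"],
   ["frminterest", "addinterest", "withindate", "frmdaily", "daily report", "legacy core"],
   ["statement", "report", "print", "export", "monthly summary", "ledger extract"],
   ["account type", "settings", "reference", "lookup", "configuration"],
   ["deposit", "withdraw", "transaction", "ledger", "balance", "interest", "funds", "atomic", "rollback", "expire"],
   ["customer", "account holder", "profile", "firstname", "lastname", "address", "phone", "email", "unique account", "tblcustomer", "tblcustomers", "tblaccount", "customerid", "accountno"]]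

def pvServices : List String :=
  ["AuthenticationService", "LegacyCoreService", "ReportingService", "ReferenceDataService", "TransactionService", "CustomerService"]

-- the dict comprehension {token: rank for rank, group in enumerate(_GROUPS) for token in group} (all 49 tokens distinct)
def pvTokenRank : List (String × Int) :=
  (PySem.List.enumerate pvGroups 0).flatMap (fun p => p.2.map (fun token => (token, p.1)))

def route_target_service_from_text_py_alt (text : String) : String :=
  let lowered := PySem.Str.lower (if text = "" then "" else text)
  let matched := (pvTokenRank.filter (fun p => PySem.Str.isIn p.1 lowered)).map (fun p => p.2)
  if matched ≠ [] then
    match PySem.List.min? matched (fun x => x) with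
    | some r =>
      match PySem.List.pyGet? pvServices r with
      | some sv => sv
      | none => ""
    | none => ""
  else ""

-- ===== PRECONDITION & SPEC =====
def Spec_route_target_service_from_text_py (text : String) (out : String) : Prop := out = route_target_service_from_text_py_alt text
instance (text : String) (out : String) : Decidable (Spec_route_target_service_from_text_py text out) := by unfold Spec_route_target_service_from_text_py; infer_instance

-- ===== CLAIM (what is proved, stated in full; the proofs are below) =====
def Claim_equal_route_target_service_from_text_py : Prop := ∀ (text : String), Dom_route_target_service_from_text_py text → Spec_route_target_service_from_text_py text (route_target_service_from_text_py text)

-- ===== LEMMAS AND PROOFS =====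

-- one block of matched ranks: the ranks contributed by group g (all equal to i)
def pvBlk (g : List String) (i : Int) (s : String) : List Int :=
  (g.filter (fun token => PySem.Str.isIn token s)).map (fun _ => i)

theorem pvBlk_all {g : List String} {i : Int} {s : String} :
    ∀ x ∈ pvBlk g i s, x = i := by
  intro x hx
  rcases List.mem_map.1 hx with ⟨t, _, h⟩
  exact h.symm

theorem pvBlk_ge {g : List String} {i j : Int} {s : String} (hij : i ≤ j) :
    ∀ x ∈ pvBlk g j s, i ≤ x := by
  intro x hx
  rw [pvBlk_all x hx]
  exact hij

theorem pvBlk_eq_nil_iff {g : List String} {i : Int} {s : String} :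
    pvBlk g i s = [] ↔ g.any (fun token => PySem.Str.isIn token s) = false := by
  simp [pvBlk, List.filter_eq_nil_iff, List.any_eq_false]

theorem pv_min_blocks (l1 l2 : List Int) (a : Int)
    (h1 : ∀ x ∈ l1, x = a) (h2 : ∀ x ∈ l2, a ≤ x) :
    PySem.List.min? (l1 ++ l2) (fun x => x)
      = if l1 = [] then PySem.List.min? l2 (fun x => x) else some a := by
  by_cases h : l1 = []
  · simp [h]
  · rw [if_neg h]
    cases hmin : PySem.List.min? (l1 ++ l2) (fun x => x) with
    | none =>
      have := (PySem.List.min?_eq_none_iff _ _).1 hmin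
      simp [h] at this
    | some m =>
      obtain ⟨x, hx⟩ := List.exists_mem_of_ne_nil l1 h
      have hax : a ∈ l1 := by rw [← h1 x hx]; exact hx
      have hle : m ≤ a := PySem.List.min?_isMin hmin a (List.mem_append_left _ hax)
      rcases List.mem_append.1 (PySem.List.min?_mem hmin) with h' | h'
      · exact congrArg some (h1 m h')
      · exact congrArg some (le_antisymm hle (h2 m h'))

theorem pv_min_chain (g : List String) (i : Int) (rest : List Int) (r : Option Int) (s : String)
    (hrest : ∀ x ∈ rest, i ≤ x) (hr : PySem.List.min? rest (fun x => x) = r) :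
    PySem.List.min? (pvBlk g i s ++ rest) (fun x => x)
      = if g.any (fun token => PySem.Str.isIn token s) = true then some i else r := by
  rw [pv_min_blocks _ _ i pvBlk_all hrest]
  cases hb : g.any (fun token => PySem.Str.isIn token s) with
  | false => rw [if_pos (pvBlk_eq_nil_iff.2 hb)]; simp [hr]
  | true =>
    rw [if_neg]
    · simp
    · intro hnil
      rw [pvBlk_eq_nil_iff.1 hnil] at hb
      exact Bool.noConfusion hb

theorem pv_expand :
    pvTokenRank
      = ((["login", "password", "credential", "lockout", "failed attempt", "authenticate", "signin", "recordcount < 1"] : List String).map (fun token => (token, (0 : Int))))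
        ++ (((["frminterest", "addinterest", "withindate", "frmdaily", "daily report", "legacy core"] : List String).map (fun token => (token, (1 : Int))))
        ++ (((["statement", "report", "print", "export", "monthly summary", "ledger extract"] : List String).map (fun token => (token, (2 : Int))))
        ++ (((["account type", "settings", "reference", "lookup", "configuration"] : List String).map (fun token => (token, (3 : Int))))
        ++ (((["deposit", "withdraw", "transaction", "ledger", "balance", "interest", "funds", "atomic", "rollback", "expire"] : List String).map (fun token => (token, (4 : Int))))
        ++ ((["customer", "account holder", "profile", "firstname", "lastname", "address", "phone", "email", "unique account", "tblcustomer", "tblcustomers", "tblaccount", "customerid", "accountno"] : List String).map (fun token => (token, (5 : Int)))))))) := by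
  decide

theorem pv_matched_eq (s : String) :
    (pvTokenRank.filter (fun p => PySem.Str.isIn p.1 s)).map (fun p => p.2)
      = pvBlk ["login", "password", "credential", "lockout", "failed attempt", "authenticate", "signin", "recordcount < 1"] 0 s
        ++ (pvBlk ["frminterest", "addinterest", "withindate", "frmdaily", "daily report", "legacy core"] 1 s
        ++ (pvBlk ["statement", "report", "print", "export", "monthly summary", "ledger extract"] 2 s
        ++ (pvBlk ["account type", "settings", "reference", "lookup", "configuration"] 3 s
        ++ (pvBlk ["deposit", "withdraw", "transaction", "ledger", "balance", "interest", "funds", "atomic", "rollback", "expire"] 4 s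
        ++ pvBlk ["customer", "account holder", "profile", "firstname", "lastname", "address", "phone", "email", "unique account", "tblcustomer", "tblcustomers", "tblaccount", "customerid", "accountno"] 5 s)))) := by
  rw [pv_expand]
  simp only [List.filter_append, List.map_append, List.filter_map, List.map_map, Function.comp_def, pvBlk]

theorem pv_collapse (m : List Int) (F : Int → String) :
    (if m ≠ [] then
       (match PySem.List.min? m (fun x => x) with
        | some r => F r
        | none => "")
     else "")
    = (match PySem.List.min? m (fun x => x) with
       | some r => F r
       | none => "") := by
  by_cases h : m = []
  · rw [h, (PySem.List.min?_eq_none_iff ([] : List Int) (fun x => x)).2 rfl]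
    simp
  · simp [h]

theorem pv_core (s : String) :
    (if s = "" then ""
     else
       if ["login", "password", "credential", "lockout", "failed attempt", "authenticate", "signin", "recordcount < 1"].any (fun token => PySem.Str.isIn token s) then "AuthenticationService"
       else if ["frminterest", "addinterest", "withindate", "frmdaily", "daily report", "legacy core"].any (fun token => PySem.Str.isIn token s) then "LegacyCoreService"
       else if ["statement", "report", "print", "export", "monthly summary", "ledger extract"].any (fun token => PySem.Str.isIn token s) then "ReportingService"
       else if ["account type", "settings", "reference", "lookup", "configuration"].any (fun token => PySem.Str.isIn token s) then "ReferenceDataService"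
       else if ["customer", "account holder", "profile", "firstname", "lastname", "address", "phone", "email", "unique account", "tblcustomer", "tblcustomers", "tblaccount", "customerid", "accountno"].any (fun token => PySem.Str.isIn token s) && !(["deposit", "withdraw", "transaction", "ledger", "balance", "interest", "funds", "atomic", "rollback", "expire"].any (fun token => PySem.Str.isIn token s)) then "CustomerService"
       else if ["deposit", "withdraw", "transaction", "ledger", "balance", "interest", "funds", "atomic", "rollback", "expire"].any (fun token => PySem.Str.isIn token s) then "TransactionService"
       else if ["customer", "account holder", "profile", "firstname", "lastname", "address", "phone", "email", "unique account", "tblcustomer", "tblcustomers", "tblaccount", "customerid", "accountno"].any (fun token => PySem.Str.isIn token s) then "CustomerService"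
       else "")
    = (let matched := (pvTokenRank.filter (fun p => PySem.Str.isIn p.1 s)).map (fun p => p.2)
       if matched ≠ [] then
         match PySem.List.min? matched (fun x => x) with
         | some r =>
           match PySem.List.pyGet? pvServices r with
           | some sv => sv
           | none => ""
         | none => ""
       else "") := by
  by_cases hs : s = ""
  · subst hs; decide
  · rw [if_neg hs]
    show _ = (if _ then _ else "")
    rw [pv_collapse, pv_matched_eq]
    have m5 := pv_min_chain ["customer", "account holder", "profile", "firstname", "lastname", "address", "phone", "email", "unique account", "tblcustomer", "tblcustomers", "tblaccount", "customerid", "accountno"] 5 [] none s (by simp) ((PySem.List.min?_eq_none_iff _ _).2 rfl)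
    rw [List.append_nil] at m5
    have m4 := pv_min_chain ["deposit", "withdraw", "transaction", "ledger", "balance", "interest", "funds", "atomic", "rollback", "expire"] 4 _ _ s (pvBlk_ge (by norm_num)) m5
    have m3 := pv_min_chain ["account type", "settings", "reference", "lookup", "configuration"] 3 _ _ s (List.forall_mem_append.2 ⟨pvBlk_ge (by norm_num), pvBlk_ge (by norm_num)⟩) m4
    have m2 := pv_min_chain ["statement", "report", "print", "export", "monthly summary", "ledger extract"] 2 _ _ s (List.forall_mem_append.2 ⟨pvBlk_ge (by norm_num), List.forall_mem_append.2 ⟨pvBlk_ge (by norm_num), pvBlk_ge (by norm_num)⟩⟩) m3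
    have m1 := pv_min_chain ["frminterest", "addinterest", "withindate", "frmdaily", "daily report", "legacy core"] 1 _ _ s (List.forall_mem_append.2 ⟨pvBlk_ge (by norm_num), List.forall_mem_append.2 ⟨pvBlk_ge (by norm_num), List.forall_mem_append.2 ⟨pvBlk_ge (by norm_num), pvBlk_ge (by norm_num)⟩⟩⟩) m2
    have m0 := pv_min_chain ["login", "password", "credential", "lockout", "failed attempt", "authenticate", "signin", "recordcount < 1"] 0 _ _ s (List.forall_mem_append.2 ⟨pvBlk_ge (by norm_num), List.forall_mem_append.2 ⟨pvBlk_ge (by norm_num), List.forall_mem_append.2 ⟨pvBlk_ge (by norm_num), List.forall_mem_append.2 ⟨pvBlk_ge (by norm_num), pvBlk_ge (by norm_num)⟩⟩⟩⟩) m1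
    rw [m0]
    cases hb0 : ["login", "password", "credential", "lockout", "failed attempt", "authenticate", "signin", "recordcount < 1"].any (fun token => PySem.Str.isIn token s) <;>
    cases hb1 : ["frminterest", "addinterest", "withindate", "frmdaily", "daily report", "legacy core"].any (fun token => PySem.Str.isIn token s) <;>
    cases hb2 : ["statement", "report", "print", "export", "monthly summary", "ledger extract"].any (fun token => PySem.Str.isIn token s) <;>
    cases hb3 : ["account type", "settings", "reference", "lookup", "configuration"].any (fun token => PySem.Str.isIn token s) <;>
    cases hb4 : ["deposit", "withdraw", "transaction", "ledger", "balance", "interest", "funds", "atomic", "rollback", "expire"].any (fun token => PySem.Str.isIn token s) <;>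
    cases hb5 : ["customer", "account holder", "profile", "firstname", "lastname", "address", "phone", "email", "unique account", "tblcustomer", "tblcustomers", "tblaccount", "customerid", "accountno"].any (fun token => PySem.Str.isIn token s) <;>
    simp only [hb0, hb1, hb2, hb3, hb4, hb5, if_true, if_false, Bool.true_and, Bool.false_and,
               Bool.and_true, Bool.and_false, Bool.not_true, Bool.not_false, if_pos, ite_true, ite_false] <;>
    rfl

-- ===== VERDICT (by name: the statement is the Claim_ definition above) =====
theorem route_target_service_from_text_py_spec : Claim_equal_route_target_service_from_text_py := by
  intro text _
  unfold Spec_route_target_service_from_text_py route_target_service_from_text_py route_target_service_from_text_py_alt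
  exact pv_core _
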